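-- pv_equiv track=rewrite | github.com/vvineis/participatory_training | utils/decisions/evaluate_decisions.py | _get_best_action_given_outcome
-- ===== SOURCE A (Python) =====
-- def _get_best_action_given_outcome(recovery_times, obj='min'):
--     if obj == 'min':
--         # Find the minimum value
--         min_value = min(recovery_times.values())
--         # Filter actions with the minimum value
--         best_actions = [action for action, value in recovery_times.items() if value == min_value]
--         # Favor action 'C' in case of a tie
--         return 'C' if 'C' in best_actions else best_actions[0]
--     elif obj == 'max':
--         # Find the maximum value
--         max_value = max(recovery_times.values())
--         # Filter actions with the maximum value
--         best_actions = [action for action, value in recovery_times.items() if value == max_value]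
--         # Favor action 'C' in case of a tie
--         return 'C' if 'C' in best_actions else best_actions[0]
--     else:
--         raise ValueError(f"Unsupported objective: {obj}. Use 'min' or 'max'.")
-- ===== SOURCE B (Python) =====
-- def _get_best_action_given_outcome(recovery_times, obj='min'):
--     if obj == 'min':
--         sign = 1
--     elif obj == 'max':
--         sign = -1
--     else:
--         raise ValueError(f"Unsupported objective: {obj}. Use 'min' or 'max'.")
--     best_action = None
--     best_value = None
--     for action, value in recovery_times.items():
--         v = sign * value
--         if best_value is None or v < best_value:
--             best_action, best_value = action, v
--         elif v == best_value and action == 'C':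
--             best_action = 'C'
--     if best_action is None:
--         raise ValueError(f"{obj}() arg is an empty sequence")
--     return best_action
-- ===== Notes on version B (the rewrite author's own statement) =====
-- stated objective: alternative
-- what changed: Replaces A's per-branch min()/max() pass plus filter plus membership/indexing passes with a single fused scan over the items that maintains (best_action, best_value), folding the 'max' case into the 'min' comparison via a +1/-1 sign and applying the 'C' tie-break on the fly.
import Mathlib
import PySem

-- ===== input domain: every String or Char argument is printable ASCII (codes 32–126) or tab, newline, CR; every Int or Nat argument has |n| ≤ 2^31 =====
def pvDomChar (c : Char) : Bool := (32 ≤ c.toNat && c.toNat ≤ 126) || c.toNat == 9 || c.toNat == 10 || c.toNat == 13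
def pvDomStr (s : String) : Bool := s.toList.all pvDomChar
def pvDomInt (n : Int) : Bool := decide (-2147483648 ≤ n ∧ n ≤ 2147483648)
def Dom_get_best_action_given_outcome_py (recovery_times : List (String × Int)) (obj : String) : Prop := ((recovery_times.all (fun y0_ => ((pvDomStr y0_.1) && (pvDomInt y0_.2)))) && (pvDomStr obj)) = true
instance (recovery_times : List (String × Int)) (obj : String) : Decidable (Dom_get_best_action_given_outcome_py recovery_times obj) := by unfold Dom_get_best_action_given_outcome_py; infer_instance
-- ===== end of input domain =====

-- B replaces A's per-branch min/max + filter + membership passes by one fused scan over the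
-- items keeping (best_action, best_value), with a ±1 sign folding 'max' into 'min' (alternative decomposition).

-- ===== PORT A =====
def get_best_action_given_outcome_py (recovery_times : List (String × Int)) (obj : String) : String :=
  let d := PySem.Dict.ofList recovery_times
  if obj == "min" then
    match PySem.List.min? d.values (fun y => y) with
    | none => ""  -- Python raises ValueError on an empty dict; excluded by Pre_
    | some min_value =>
      let best_actions := (d.items.filter (fun p => p.2 == min_value)).map (fun p => p.1)
      if best_actions.contains "C" then "C" else best_actions.headD ""
  else if obj == "max" then
    match PySem.List.max? d.values (fun y => y) with
    | none => ""
    | some max_value =>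
      let best_actions := (d.items.filter (fun p => p.2 == max_value)).map (fun p => p.1)
      if best_actions.contains "C" then "C" else best_actions.headD ""
  else ""  -- Python raises ValueError; excluded by Pre_

-- ===== PORT B =====
-- the 'for action, value in recovery_times.items()' loop of Source B, after the first item seeded the state
def pvAltLoop (sign : Int) : List (String × Int) → String → Int → String
  | [], best_action, _ => best_action
  | (action, value) :: rest, best_action, best_value =>
    let v := sign * value
    if v < best_value then pvAltLoop sign rest action v
    else if v == best_value && action == "C" then pvAltLoop sign rest "C" best_value
    else pvAltLoop sign rest best_action best_value

def get_best_action_given_outcome_py_alt (recovery_times : List (String × Int)) (obj : String) : String :=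
  let d := PySem.Dict.ofList recovery_times
  let run : Int → String := fun sign =>
    match d.items with
    | [] => ""  -- Python Source B raises ValueError on an empty dict; excluded by Pre_
    | (action, value) :: rest => pvAltLoop sign rest action (sign * value)
  if obj == "min" then run 1
  else if obj == "max" then run (-1)
  else ""  -- Python raises ValueError; excluded by Pre_

-- ===== PRECONDITION & SPEC =====
-- Pre_ excludes exactly the inputs where the Python A raises ValueError: the empty dict, and any obj other than 'min'/'max'.
def Pre_get_best_action_given_outcome_py (recovery_times : List (String × Int)) (obj : String) : Prop :=
  recovery_times ≠ [] ∧ (obj = "min" ∨ obj = "max")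
instance (recovery_times : List (String × Int)) (obj : String) : Decidable (Pre_get_best_action_given_outcome_py recovery_times obj) := by unfold Pre_get_best_action_given_outcome_py; infer_instance

def pvWitness_get_best_action_given_outcome_py : (List (String × Int)) × String := ([("A", 3), ("C", 3), ("B", 1)], "min")

def Spec_get_best_action_given_outcome_py (recovery_times : List (String × Int)) (obj : String) (out : String) : Prop := out = get_best_action_given_outcome_py_alt recovery_times obj
instance (recovery_times : List (String × Int)) (obj : String) (out : String) : Decidable (Spec_get_best_action_given_outcome_py recovery_times obj out) := by unfold Spec_get_best_action_given_outcome_py; infer_instance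

-- ===== CLAIM (what is proved, stated in full; the proofs are below) =====
def Claim_equal_get_best_action_given_outcome_py : Prop := ∀ (recovery_times : List (String × Int)) (obj : String), Dom_get_best_action_given_outcome_py recovery_times obj → Pre_get_best_action_given_outcome_py recovery_times obj → Spec_get_best_action_given_outcome_py recovery_times obj (get_best_action_given_outcome_py recovery_times obj)

-- ===== LEMMAS AND PROOFS =====

-- A's min/filter/tie-break branch, as a function of the first item (ba, bv) and the rest l
def pvBest (ba : String) (bv : Int) (l : List (String × Int)) : String :=
  let m := l.foldl (fun acc p => min acc p.2) bv
  let best := (((ba, bv) :: l).filter (fun p => p.2 == m)).map (fun p => p.1)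
  if best.contains "C" then "C" else best.headD ""

lemma pvFoldlMin_le (l : List (String × Int)) (b : Int) :
    l.foldl (fun acc p => min acc p.2) b ≤ b := by
  induction l generalizing b with
  | nil => simp
  | cons p t ih => exact le_trans (ih _) (min_le_left _ _)

lemma pvBest_cons (ba : String) (bv : Int) (a : String) (v : Int) (l : List (String × Int)) :
    pvBest ba bv ((a, v) :: l) =
      if v < bv then pvBest a v l
      else if v == bv && a == "C" then pvBest "C" bv l
      else pvBest ba bv l := by
  unfold pvBest
  simp only [List.foldl_cons]
  by_cases h1 : v < bv
  · rw [if_pos h1, min_eq_right (le_of_lt h1)]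
    have hm : l.foldl (fun acc p => min acc p.2) v ≤ v := pvFoldlMin_le l v
    rw [List.filter_cons_of_neg (by simp; omega)]
  · rw [if_neg h1]
    have hmin : min bv v = bv := min_eq_left (by omega)
    rw [hmin]
    have hm : l.foldl (fun acc p => min acc p.2) bv ≤ bv := pvFoldlMin_le l bv
    by_cases h2 : v = bv ∧ a = "C"
    · obtain ⟨hv, ha⟩ := h2
      subst hv ha
      simp only [beq_self_eq_true, Bool.and_self, if_true]
      by_cases hmb : v = l.foldl (fun acc p => min acc p.2) v
      · simp [← hmb]
      · rw [List.filter_cons_of_neg (by simp; omega),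
            List.filter_cons_of_neg (by simp; omega)]
    · have h2' : ¬ ((v == bv && a == "C") = true) := by
        simp only [Bool.and_eq_true, beq_iff_eq]; tauto
      rw [if_neg h2']
      by_cases hv : v = bv
      · have ha : ¬ (a = "C") := by tauto
        have ha' : ("C" : String) ≠ a := fun h => ha h.symm
        subst hv
        by_cases hmb : v = l.foldl (fun acc p => min acc p.2) v
        · rw [List.filter_cons_of_pos (by simp [← hmb]),
              List.filter_cons_of_pos (by simp [← hmb]),
              List.filter_cons_of_pos (by simp [← hmb])]
          simp [ha']
        · rw [List.filter_cons_of_neg (by simp; omega),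
              List.filter_cons_of_neg (by simp; omega),
              List.filter_cons_of_neg (by simp; omega)]
      · have hlt : bv < v := by omega
        conv_lhs => rw [List.filter_cons]
        conv_rhs => rw [List.filter_cons]
        rw [List.filter_cons_of_neg (by simp; omega)]

lemma pvAltLoop_spec (sign : Int) (l : List (String × Int)) (ba : String) (bv : Int) :
    pvAltLoop sign l ba bv = pvBest ba bv (l.map (fun p => (p.1, sign * p.2))) := by
  induction l generalizing ba bv with
  | nil => simp [pvAltLoop, pvBest, eq_comm]
  | cons p t ih =>
    obtain ⟨a, v⟩ := p
    simp only [pvAltLoop, List.map_cons]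
    rw [pvBest_cons]
    by_cases h1 : sign * v < bv
    · rw [if_pos h1, if_pos h1, ih]
    · rw [if_neg h1, if_neg h1]
      by_cases h2 : (sign * v == bv && a == "C") = true
      · rw [if_pos h2, if_pos h2, ih]
      · rw [if_neg h2, if_neg h2, ih]

-- the min branch of A is pvBest of the first item and the rest
lemma pvA_min_branch (a : String) (v : Int) (t : List (String × Int)) :
    (match PySem.List.min? (((a, v) :: t).map (fun p => p.2)) (fun y => y) with
      | none => ""
      | some m =>
        let best := (((a, v) :: t).filter (fun p => p.2 == m)).map (fun p => p.1)
        if best.contains "C" then "C" else best.headD "") = pvBest a v t := by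
  rw [List.map_cons, PySem.List.min?_id_cons, List.foldl_map]
  rfl

lemma pvNegFoldlMax (t : List (String × Int)) (b : Int) :
    (t.map (fun p => ((p.1 : String), -p.2))).foldl (fun acc p => min acc p.2) (-b)
      = -(t.foldl (fun acc p => max acc p.2) b) := by
  induction t generalizing b with
  | nil => simp
  | cons p r ih => simp only [List.map_cons, List.foldl_cons, min_neg_neg]; exact ih _

lemma pvNegFilter (t : List (String × Int)) (M : Int) :
    ((t.map (fun p => ((p.1 : String), -p.2))).filter (fun p => p.2 == -M)).map (fun p => p.1)
      = (t.filter (fun p => p.2 == M)).map (fun p => p.1) := by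
  induction t with
  | nil => rfl
  | cons p r ih =>
    simp only [List.map_cons, List.filter_cons]
    by_cases h : p.2 = M
    · simp [h, ih]
    · have h' : ¬ (-p.2 = -M) := by omega
      simp [h, h', ih]

lemma pvA_max_branch (a : String) (v : Int) (t : List (String × Int)) :
    (match PySem.List.max? (((a, v) :: t).map (fun p => p.2)) (fun y => y) with
      | none => ""
      | some m =>
        let best := (((a, v) :: t).filter (fun p => p.2 == m)).map (fun p => p.1)
        if best.contains "C" then "C" else best.headD "") =
    pvBest a (-v) (t.map (fun p => (p.1, -p.2))) := by
  rw [List.map_cons, PySem.List.max?_id_cons, List.foldl_map]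
  unfold pvBest
  rw [pvNegFoldlMax t v]
  have hcons :
      ((((a, -v) :: t.map (fun p => ((p.1 : String), -p.2))).filter
          (fun p => p.2 == -(t.foldl (fun acc p => max acc p.2) v))).map (fun p => p.1))
        = (((a, v) :: t).filter
            (fun p => p.2 == t.foldl (fun acc p => max acc p.2) v)).map (fun p => p.1) := by
    simp only [List.filter_cons]
    by_cases h : v = t.foldl (fun acc p => max acc p.2) v
    · simp [← h, pvNegFilter]
    · have h' : ¬ (-v = -(t.foldl (fun acc p => max acc p.2) v)) := by omega
      simp [h, h', pvNegFilter]
  simp only [hcons]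

-- items of a dict built from a nonempty list are nonempty
lemma pvInsert_items_ne_nil (d : PySem.Dict String Int) (k : String) (v : Int) :
    (d.insert k v).items ≠ [] := by
  rw [PySem.Dict.items_insert]
  split
  · next hc =>
    intro h
    rw [List.map_eq_nil_iff] at h
    rw [PySem.Dict.contains_eq_decide_mem_keys] at hc
    simp only [PySem.Dict.keys, h, List.map_nil] at hc
    simp at hc
  · simp

lemma pvFoldl_items_ne_nil (l : List (String × Int)) (d : PySem.Dict String Int)
    (h : d.items ≠ []) :
    (l.foldl (fun acc p => acc.insert p.1 p.2) d).items ≠ [] := by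
  induction l generalizing d with
  | nil => exact h
  | cons p t ih => exact ih _ (pvInsert_items_ne_nil d p.1 p.2)

lemma pvOfList_items_ne_nil (rt : List (String × Int)) (h : rt ≠ []) :
    (PySem.Dict.ofList rt).items ≠ [] := by
  match rt with
  | [] => exact absurd rfl h
  | p :: t =>
    show ((p :: t).foldl (fun acc q => acc.insert q.1 q.2) PySem.Dict.empty).items ≠ []
    rw [List.foldl_cons]
    exact pvFoldl_items_ne_nil t _ (pvInsert_items_ne_nil _ p.1 p.2)

-- ===== VERDICT (by name: the statement is the Claim_ definition above) =====
theorem get_best_action_given_outcome_py_spec : Claim_equal_get_best_action_given_outcome_py := by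
  intro rt obj _ hpre
  obtain ⟨hne, hobj⟩ := hpre
  unfold Spec_get_best_action_given_outcome_py
  unfold get_best_action_given_outcome_py get_best_action_given_outcome_py_alt
  have hitems := pvOfList_items_ne_nil rt hne
  cases hi : (PySem.Dict.ofList rt).items with
  | nil => exact absurd hi hitems
  | cons p t =>
    obtain ⟨a, v⟩ := p
    rcases hobj with hobj | hobj <;> subst hobj
    · simp only [beq_self_eq_true, if_true, PySem.Dict.values, hi]
      rw [pvA_min_branch, pvAltLoop_spec]
      simp [one_mul]
    · rw [if_neg (by decide), if_pos (by decide), if_neg (by decide), if_pos (by decide)]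
      simp only [PySem.Dict.values, hi]
      rw [pvA_max_branch, pvAltLoop_spec]
      simp
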